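-- pv_equiv track=rewrite | github.com/mvalois/zxcvbn-python-probabilistic | zxcvbn/grammar_utils.py | bases
-- ===== SOURCE A (Python) =====
-- def bases(w) :
--     simple_bases = []
--     composed_base = ''
--     word =''
--     for c in w:
--         if word == '': word = c
--         elif char_type(word[-1]) == char_type(c):
--             word += c
--         else :
--             simple_bases.append(word)
--             composed_base += char_type(word[-1]) + str(len(word))
--             word = c
--     simple_bases.append(word)
--
--     composed_base += char_type(word[-1]) + str(len(word))
--     return simple_bases, composed_base
--
-- def char_type(c):
--     if c.isdigit() : return 'D'
--     elif c.isalpha(): return 'L'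
--     else : return 'S'
-- ===== SOURCE B (Python) =====
-- # B: span/cut decomposition -- peel one whole run per outer step with an inner
-- # scan, collect run strings and composed pieces separately, join at the end.
-- # No '' sentinel word accumulator. On empty w it returns ([], '') where A raises.
--
-- def char_type(c):
--     if c.isdigit():
--         return 'D'
--     elif c.isalpha():
--         return 'L'
--     else:
--         return 'S'
--
-- def bases(w):
--     runs = []
--     comp = []
--     rest = w
--     while rest:
--         t = char_type(rest[0])
--         k = 1
--         while k < len(rest) and char_type(rest[k]) == t:
--             k += 1
--         runs.append(rest[:k])
--         comp.append(t + str(k))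
--         rest = rest[k:]
--     return runs, ''.join(comp)
-- ===== Notes on version B (the rewrite author's own statement) =====
-- stated objective: alternative
-- what changed: B replaces A's character-by-character accumulator loop with a '' sentinel by a span/cut decomposition: each outer step measures one whole same-type run with an inner scan, slices it off, and collects run strings and composed pieces in separate lists joined at the end.
-- outside the precondition, e.g. on bases(''): A raises IndexError, B returns ([], '')
import Mathlib
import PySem

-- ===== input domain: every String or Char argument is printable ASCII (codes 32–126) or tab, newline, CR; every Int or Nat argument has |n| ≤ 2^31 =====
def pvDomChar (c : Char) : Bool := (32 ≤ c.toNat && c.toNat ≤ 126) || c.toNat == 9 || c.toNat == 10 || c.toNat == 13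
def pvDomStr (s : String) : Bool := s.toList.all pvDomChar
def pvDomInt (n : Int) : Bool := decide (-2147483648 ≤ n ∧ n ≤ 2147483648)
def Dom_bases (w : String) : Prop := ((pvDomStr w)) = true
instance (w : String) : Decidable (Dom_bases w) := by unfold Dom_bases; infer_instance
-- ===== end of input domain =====

-- B peels whole same-type runs with an inner span scan instead of A's per-character
-- accumulator loop with a '' sentinel; same cost, different decomposition.


-- ===== PORT A =====
-- char_type(c) for the single characters both Pythons feed it; returns the 1-char
-- string 'D'/'L'/'S' as a Char (exact: the tag strings have length 1).
def ctype (c : Char) : Char :=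
  if PySem.Chars.isdigit c then 'D'
  else if PySem.Chars.isalpha c then 'L'
  else 'S'

-- one iteration of A's for-loop; state = (simple_bases, composed_base, word),
-- strings under construction carried as List Char
def stepA (st : List String × List Char × List Char) (c : Char) :
    List String × List Char × List Char :=
  match st with
  | (sb, cb, word) =>
    if word = [] then (sb, cb, [c])
    else
      match word.getLast? with   -- word[-1]; word ≠ '' in this branch
      | some lc =>
          if ctype lc = ctype c then (sb, cb, word ++ [c])
          else (sb ++ [String.ofList word],
                cb ++ ctype lc :: PySem.Int.toChars (word.length : Int), [c])
      | none => (sb, cb, word)   -- unreachable: guarded by word ≠ ''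
-- A's code after the loop: append word; word[-1] raises IndexError when word = ''
def finA (sb : List String) (cb word : List Char) : List String × String :=
  match word.getLast? with
  | some lc => (sb ++ [String.ofList word],
                String.ofList (cb ++ ctype lc :: PySem.Int.toChars (word.length : Int)))
  | none => (sb ++ [String.ofList word], String.ofList cb)  -- Python raises here (w = ''); excluded by Pre_bases

def bases (w : String) : List String × String :=
  match w.toList.foldl stepA ([], [], []) with
  | (sb, cb, word) => finA sb cb word

-- ===== PORT B =====
-- inner while: number of further same-type characters at the front of rest[1:]
def spanLen (t : Char) : List Char → Nat
  | [] => 0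
  | c :: cs => if ctype c = t then spanLen t cs + 1 else 0

-- outer while over rest: cut off one run of length k = 1 + spanLen, recurse on rest[k:]
def goB : List Char → List String × List (List Char)
  | [] => ([], [])
  | c :: cs' =>
    let t := ctype c
    let k := 1 + spanLen t cs'
    let r := goB (List.drop k (c :: cs'))
    (String.ofList (List.take k (c :: cs')) :: r.1,
     (t :: PySem.Int.toChars (k : Int)) :: r.2)
  termination_by cs => cs.length
  decreasing_by simp [List.length_drop]

def bases_alt (w : String) : List String × String :=
  match goB w.toList with
  | (runs, comp) => (runs, String.ofList comp.flatten)   -- ''.join(comp)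

-- ===== PRECONDITION & SPEC =====
-- A raises IndexError on w = '' (word[-1] on the empty sentinel); that is the only input excluded.
def Pre_bases (w : String) : Prop := w ≠ ""
instance (w : String) : Decidable (Pre_bases w) := by unfold Pre_bases; infer_instance
def pvWitness_bases : String := "ab12 x"


def Spec_bases (w : String) (out : List String × String) : Prop := out = bases_alt w
instance (w : String) (out : List String × String) : Decidable (Spec_bases w out) := by unfold Spec_bases; infer_instance

-- ===== CLAIM (what is proved, stated in full; the proofs are below) =====
def Claim_equal_bases : Prop := ∀ (w : String), Dom_bases w → Pre_bases w → Spec_bases w (bases w)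

-- ===== LEMMAS AND PROOFS =====

lemma spanLen_append (t : Char) (ws rest : List Char) (hu : ∀ c ∈ ws, ctype c = t) :
    spanLen t (ws ++ rest) = ws.length + spanLen t rest := by
  induction ws with
  | nil => simp
  | cons a as ih =>
      have ha : ctype a = t := hu a (by simp)
      simp [spanLen, ha, ih (fun c hc => hu c (by simp [hc]))]
      omega

lemma spanLen_head_ne (t : Char) (rest : List Char)
    (hr : rest = [] ∨ ∃ d ds, rest = d :: ds ∧ ctype d ≠ t) :
    spanLen t rest = 0 := by
  rcases hr with h | ⟨d, ds, h, hd⟩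
  · simp [h, spanLen]
  · simp [h, spanLen, hd]

lemma goB_append (word rest : List Char) (t : Char) (hw : word ≠ [])
    (hu : ∀ c ∈ word, ctype c = t)
    (hr : rest = [] ∨ ∃ d ds, rest = d :: ds ∧ ctype d ≠ t) :
    goB (word ++ rest)
      = (String.ofList word :: (goB rest).1,
         (t :: PySem.Int.toChars (word.length : Int)) :: (goB rest).2) := by
  obtain ⟨d, ws, rfl⟩ : ∃ d ws, word = d :: ws := by
    cases word with
    | nil => exact absurd rfl hw
    | cons d ws => exact ⟨d, ws, rfl⟩
  have hd : ctype d = t := hu d (by simp)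
  have hws : ∀ c ∈ ws, ctype c = t := fun c hc => hu c (by simp [hc])
  have hspan : spanLen (ctype d) (ws ++ rest) = ws.length := by
    rw [hd, spanLen_append t ws rest hws, spanLen_head_ne t rest hr]
    omega
  have hk : 1 + spanLen (ctype d) (ws ++ rest) = (d :: ws).length := by
    simp [hspan]; omega
  rw [show (d :: ws) ++ rest = d :: (ws ++ rest) from rfl]
  rw [goB]
  simp only [hk]
  rw [show d :: (ws ++ rest) = (d :: ws) ++ rest from rfl,
      List.take_left, List.drop_left]
  simp [hd]

lemma loop_spec (cs : List Char) (sb : List String) (cb word : List Char) (t : Char)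
    (hw : word ≠ []) (hu : ∀ c ∈ word, ctype c = t) :
    (match List.foldl stepA (sb, cb, word) cs with
     | (sb', cb', word') => finA sb' cb' word')
      = (sb ++ (goB (word ++ cs)).1,
         String.ofList (cb ++ ((goB (word ++ cs)).2).flatten)) := by
  induction cs generalizing sb cb word t with
  | nil =>
      obtain ⟨lc, hlc⟩ : ∃ lc, word.getLast? = some lc := by
        cases h : word.getLast? with
        | none => exact absurd (List.getLast?_eq_none_iff.mp h) hw
        | some lc => exact ⟨lc, rfl⟩
      have hlct : ctype lc = t := hu lc (List.mem_of_getLast? hlc)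
      have hsplit := goB_append word [] t hw hu (Or.inl rfl)
      simp only [List.foldl_nil, List.append_nil] at *
      rw [hsplit]
      simp [finA, hlc, hlct, goB]
  | cons c cs' ih =>
      obtain ⟨lc, hlc⟩ : ∃ lc, word.getLast? = some lc := by
        cases h : word.getLast? with
        | none => exact absurd (List.getLast?_eq_none_iff.mp h) hw
        | some lc => exact ⟨lc, rfl⟩
      have hlct : ctype lc = t := hu lc (List.mem_of_getLast? hlc)
      rw [List.foldl_cons]
      by_cases hct : ctype c = t
      · have hstep : stepA (sb, cb, word) c = (sb, cb, word ++ [c]) := by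
          simp [stepA, hw, hlc, hlct, hct]
        rw [hstep, ih sb cb (word ++ [c]) t (by simp)
              (by intro x hx; rcases List.mem_append.mp hx with h | h
                  · exact hu x h
                  · simp at h; simp [h, hct])]
        simp [List.append_assoc]
      · have hct' : ¬ t = ctype c := fun h => hct h.symm
        have hstep : stepA (sb, cb, word) c
            = (sb ++ [String.ofList word],
               cb ++ ctype lc :: PySem.Int.toChars (word.length : Int), [c]) := by
          simp [stepA, hw, hlc, hlct, hct']
        rw [hstep, ih _ _ [c] (ctype c) (by simp) (by simp)]
        have hsplit := goB_append word (c :: cs') t hw hu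
          (Or.inr ⟨c, cs', rfl, hct⟩)
        rw [hsplit]
        simp [hlct, List.append_assoc]

-- ===== VERDICT (by name: the statement is the Claim_ definition above) =====
theorem bases_spec : Claim_equal_bases := by
  intro w _ hpre
  unfold Spec_bases bases bases_alt
  have hne : w.toList ≠ [] := by
    intro h
    exact hpre (by
      have := congrArg String.ofList h
      simpa using this)
  cases hcs : w.toList with
  | nil => exact absurd hcs hne
  | cons c cs' =>
      have hstep : stepA ([], [], []) c = ([], [], [c]) := by simp [stepA]
      rw [List.foldl_cons, hstep]
      have hm : (match List.foldl stepA ([], [], [c]) cs' with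
          | (sb, cb, word) => finA sb cb word)
          = (match List.foldl stepA (([] : List String), ([] : List Char), [c]) cs' with
             | (sb', cb', word') => finA sb' cb' word') := rfl
      rw [hm, loop_spec cs' [] [] [c] (ctype c) (by simp) (by simp)]
      simp only [List.singleton_append, List.nil_append]
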